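-- pv_equiv track=rewrite | github.com/Chase-Hao/RA-work | 3.CEO panel (Lexis data)/Lexis_parsing.py | spouse_add
-- ===== SOURCE A (Python) =====
-- def spouse_add(f1):
--     flist=f1.split('\n')
--     ind_start=flist[0].find("Address")
--     add_list=[]
--     add=''
--     for l in flist:
--         if len(l)>ind_start:
--             if add=='':
--                 add=l[ind_start:len(l)]
--             else:
--                 add=add+", "+l[ind_start:len(l)]
--         else:
--             if len(add)>10:
--                 add_list.append(add)
--             add=''
--     return add_list
-- ===== SOURCE B (Python) =====
-- def spouse_add(f1):
--     lines = f1.split('\n')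
--     ind = lines[0].find("Address")
--
--     def blocks():
--         # scan for terminators: each short line closes the block of long lines before it
--         pos = 0
--         while True:
--             nxt = next((i for i in range(pos, len(lines)) if len(lines[i]) <= ind), None)
--             if nxt is None:
--                 return  # no terminator left: a trailing block of long lines is dropped
--             yield ", ".join(l[ind:] for l in lines[pos:nxt])
--             pos = nxt + 1
--
--     return [b for b in blocks() if len(b) > 10]
-- ===== Notes on version B (the rewrite author's own statement) =====
-- stated objective: alternative
-- what changed: A threads one growing accumulator string through a single pass, flushing it at each short line; B has no accumulator at all: it repeatedly searches for the next short (terminating) line, joins the slice of long lines before it in one ', '.join, keeps it if longer than 10 chars, and jumps past the terminator (a trailing unterminated block is naturally dropped because no terminator is found).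
import Mathlib
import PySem

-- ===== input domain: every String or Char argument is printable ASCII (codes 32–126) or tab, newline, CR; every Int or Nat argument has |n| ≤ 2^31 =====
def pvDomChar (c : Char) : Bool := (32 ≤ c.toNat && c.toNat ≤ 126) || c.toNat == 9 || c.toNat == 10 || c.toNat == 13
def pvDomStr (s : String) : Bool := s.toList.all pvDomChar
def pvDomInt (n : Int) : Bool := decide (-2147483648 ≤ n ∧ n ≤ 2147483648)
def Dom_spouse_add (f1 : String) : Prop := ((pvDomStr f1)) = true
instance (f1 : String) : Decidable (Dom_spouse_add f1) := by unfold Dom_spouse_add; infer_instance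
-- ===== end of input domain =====

-- B replaces A's one-pass growing-string accumulator by a delimiter-scan: repeatedly
-- find the next short line, emit the ', '.join of the block of long lines before it,
-- then filter the blocks longer than 10 chars; objective: alternative decomposition.
-- A mutates nothing; equivalence is about the return value.


-- ===== PORT A =====
-- strings are carried as List Char (PySem.Chars is exact there); 'add' is the
-- running accumulator string, 'add_list' the result list.
-- f1.split('\n') is never empty, so flist[0] is exactly flist.headD [].
def spouse_add (f1 : String) : List String :=
  let flist := PySem.Chars.splitOn f1.toList ['\n']
  let ind_start := PySem.Chars.find (flist.headD []) "Address".toList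
  let res := flist.foldl (fun (st : List String × List Char) l =>
    if (l.length : Int) > ind_start then
      if st.2 = [] then
        (st.1, PySem.Chars.slice l (some ind_start) (some (l.length : Int)))
      else
        (st.1, st.2 ++ ", ".toList ++ PySem.Chars.slice l (some ind_start) (some (l.length : Int)))
    else
      if st.2.length > 10 then (st.1 ++ [String.ofList st.2], []) else (st.1, []))
    ([], [])
  res.1

-- ===== PORT B =====
-- B's 'blocks()' generator (a while-loop over 'pos') is rendered as recursion over the
-- remaining suffix of lines ('pos' → the suffix 'ls'); 'next(...)' over range(pos, len)
-- is findIdx? on that suffix; each step yields one joined block and jumps past the terminator.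
def spouseAddBlocks (ind : Int) (ls : List (List Char)) : List (List Char) :=
  match h : ls.findIdx? (fun l => decide ((l.length : Int) ≤ ind)) with
  | none => []
  | some nxt =>
      PySem.Chars.join ", ".toList
        ((ls.take nxt).map (fun l => PySem.Chars.slice l (some ind) (some (l.length : Int)))) ::
      spouseAddBlocks ind (ls.drop (nxt + 1))
termination_by ls.length
decreasing_by
  cases ls with
  | nil => simp at h
  | cons a as => simp [List.length_drop]

def spouse_add_alt (f1 : String) : List String :=
  let lines := PySem.Chars.splitOn f1.toList ['\n']
  let ind := PySem.Chars.find (lines.headD []) "Address".toList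
  ((spouseAddBlocks ind lines).filter (fun b => b.length > 10)).map String.ofList

-- ===== PRECONDITION & SPEC =====
def Spec_spouse_add (f1 : String) (out : List String) : Prop := out = spouse_add_alt f1
instance (f1 : String) (out : List String) : Decidable (Spec_spouse_add f1 out) := by unfold Spec_spouse_add; infer_instance

-- ===== CLAIM (what is proved, stated in full; the proofs are below) =====
def Claim_equal_spouse_add : Prop := ∀ (f1 : String), Dom_spouse_add f1 → Spec_spouse_add f1 (spouse_add f1)

-- ===== LEMMAS AND PROOFS =====

theorem join_ne_nil (sep : List Char) (cur : List (List Char)) (h0 : cur ≠ [])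
    (h1 : ∀ c ∈ cur, c ≠ []) : PySem.Chars.join sep cur ≠ [] := by
  match cur with
  | [c] => simpa [PySem.Chars.join_singleton] using h1 c (by simp)
  | c :: d :: rest =>
      rw [PySem.Chars.join_cons_cons]
      intro hc
      exact h1 c (by simp) ((List.append_eq_nil_iff.mp (List.append_eq_nil_iff.mp hc).1).1)

theorem join_append_singleton (sep x : List Char) (cur : List (List Char)) (h0 : cur ≠ []) :
    PySem.Chars.join sep (cur ++ [x]) = PySem.Chars.join sep cur ++ sep ++ x := by
  induction cur with
  | nil => exact absurd rfl h0
  | cons c cs ih =>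
      cases cs with
      | nil => simp [PySem.Chars.join_singleton, PySem.Chars.join_cons_cons]
      | cons d ds =>
          calc PySem.Chars.join sep ((c :: d :: ds) ++ [x])
              = c ++ sep ++ PySem.Chars.join sep ((d :: ds) ++ [x]) := by
                  rw [show (c :: d :: ds) ++ [x] = c :: (d :: (ds ++ [x])) from rfl]
                  exact PySem.Chars.join_cons_cons sep c d (ds ++ [x])
            _ = c ++ sep ++ (PySem.Chars.join sep (d :: ds) ++ sep ++ x) := by
                  rw [ih (by simp)]
            _ = PySem.Chars.join sep (c :: d :: ds) ++ sep ++ x := by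
                  rw [PySem.Chars.join_cons_cons]
                  simp [List.append_assoc]

theorem slice_ne_nil (l : List Char) (k : Nat) (h : (l.length : Int) > (k : Int)) :
    PySem.Chars.slice l (some (k : Int)) (some (l.length : Int)) ≠ [] := by
  have hk : k < l.length := by exact_mod_cast h
  rw [PySem.Chars.slice_eq_listSlice]
  intro hnil
  have hlen := PySem.List.length_slice l (k : Int) (l.length : Int)
  rw [hnil] at hlen
  rw [PySem.List.clampIdx_natCast, PySem.List.clampIdx_natCast] at hlen
  simp at hlen
  omega

-- A's loop on the ind < 0 case: every line counts as long, nothing is ever flushed.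
theorem spouse_add_loop_neg (sep : List Char) (ind : Int) (hind : ind < 0)
    (ls : List (List Char)) (add : List Char) (al : List String) :
    (ls.foldl (fun (st : List String × List Char) l =>
      if (l.length : Int) > ind then
        if st.2 = [] then
          (st.1, PySem.Chars.slice l (some ind) (some (l.length : Int)))
        else
          (st.1, st.2 ++ sep ++ PySem.Chars.slice l (some ind) (some (l.length : Int)))
      else
        if st.2.length > 10 then (st.1 ++ [String.ofList st.2], []) else (st.1, []))
      (al, add)).1 = al := by
  induction ls generalizing add with
  | nil => rfl
  | cons l ls ih =>
      have hl : (l.length : Int) > ind := lt_of_lt_of_le hind (by positivity)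
      simp only [List.foldl_cons, if_pos hl]
      by_cases h : add = []
      · simp only [h, if_pos]; exact ih _
      · simp only [if_neg h]; exact ih _

-- proof-side generalisation of spouseAddBlocks: 'cur' is prefixed to the first block.
def pvBlocks (ind : Int) (cur : List (List Char)) (ls : List (List Char)) : List (List Char) :=
  match h : ls.findIdx? (fun l => decide ((l.length : Int) ≤ ind)) with
  | none => []
  | some nxt =>
      PySem.Chars.join ", ".toList
        (cur ++ (ls.take nxt).map (fun l => PySem.Chars.slice l (some ind) (some (l.length : Int)))) ::
      pvBlocks ind [] (ls.drop (nxt + 1))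
termination_by ls.length
decreasing_by
  cases ls with
  | nil => simp at h
  | cons a as => simp [List.length_drop]

theorem pvBlocks_nil_eq (ind : Int) (ls : List (List Char)) :
    pvBlocks ind [] ls = spouseAddBlocks ind ls := by
  induction hls : ls.length using Nat.strong_induction_on generalizing ls with
  | _ n ih =>
    rw [pvBlocks, spouseAddBlocks]
    cases hfi : ls.findIdx? (fun l => decide ((l.length : Int) ≤ ind)) with
    | none => rfl
    | some nxt =>
        have hne : ls ≠ [] := by intro h; subst h; simp at hfi
        have hlt : (ls.drop (nxt + 1)).length < n := by
          cases ls with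
          | nil => exact absurd rfl hne
          | cons a as => subst hls; simp [List.length_drop]
        simp only [List.nil_append]
        rw [ih _ hlt _ rfl]

theorem pvBlocks_cons_long (ind : Int) (l : List Char) (ls : List (List Char))
    (cur : List (List Char)) (hl : (l.length : Int) > ind) :
    pvBlocks ind cur (l :: ls) =
      pvBlocks ind (cur ++ [PySem.Chars.slice l (some ind) (some (l.length : Int))]) ls := by
  rw [pvBlocks, pvBlocks]
  have hfi : (l :: ls).findIdx? (fun l => decide ((l.length : Int) ≤ ind)) =
      (ls.findIdx? (fun l => decide ((l.length : Int) ≤ ind))).map (· + 1) := by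
    rw [List.findIdx?_cons]
    simp only [decide_eq_true_eq]
    rw [if_neg (by omega)]
  rw [hfi]
  cases ls.findIdx? (fun l => decide ((l.length : Int) ≤ ind)) with
  | none => rfl
  | some i =>
      simp only [Option.map_some, List.take_succ_cons, List.map_cons, List.drop_succ_cons,
        List.append_assoc, List.cons_append, List.nil_append]

theorem pvBlocks_cons_short (ind : Int) (l : List Char) (ls : List (List Char))
    (cur : List (List Char)) (hl : ¬ (l.length : Int) > ind) :
    pvBlocks ind cur (l :: ls) =
      PySem.Chars.join ", ".toList cur :: pvBlocks ind [] ls := by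
  rw [pvBlocks]
  have hfi : (l :: ls).findIdx? (fun l => decide ((l.length : Int) ≤ ind)) = some 0 := by
    rw [List.findIdx?_cons]
    simp only [decide_eq_true_eq]
    rw [if_pos (by omega)]
  rw [hfi]
  simp only [List.take_zero, List.map_nil, List.append_nil, List.drop_succ_cons, List.drop_zero]

-- A's loop, started with accumulator string = join of the nonempty slices 'cur',
-- appends to 'al' exactly the over-10-chars blocks of pvBlocks.  Stated for a
-- nonnegative index k so that the slices of long lines are nonempty.
theorem spouse_add_loop_eq_blocks (k : Nat) (ls : List (List Char)) (al : List String)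
    (cur : List (List Char)) (hcur : ∀ c ∈ cur, c ≠ []) :
    (ls.foldl (fun (st : List String × List Char) l =>
      if (l.length : Int) > (k : Int) then
        if st.2 = [] then
          (st.1, PySem.Chars.slice l (some (k : Int)) (some (l.length : Int)))
        else
          (st.1, st.2 ++ ", ".toList ++ PySem.Chars.slice l (some (k : Int)) (some (l.length : Int)))
      else
        if st.2.length > 10 then (st.1 ++ [String.ofList st.2], []) else (st.1, []))
      (al, PySem.Chars.join ", ".toList cur)).1 =
    al ++ ((pvBlocks (k : Int) cur ls).filter (fun b => b.length > 10)).map String.ofList := by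
  induction ls generalizing al cur with
  | nil => rw [pvBlocks]; simp
  | cons l ls ih =>
      by_cases hl : (l.length : Int) > (k : Int)
      · -- long line: it joins the current block
        have hsl := slice_ne_nil l k hl
        have hcur' : ∀ c ∈ cur ++ [PySem.Chars.slice l (some (k : Int)) (some (l.length : Int))], c ≠ [] := by
          intro c hc
          rcases List.mem_append.mp hc with h' | h'
          · exact hcur c h'
          · simp at h'; subst h'; exact hsl
        rw [pvBlocks_cons_long _ _ _ _ hl]
        have step : (if PySem.Chars.join ", ".toList cur = [] then
              (al, PySem.Chars.slice l (some (k : Int)) (some (l.length : Int)))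
            else
              (al, PySem.Chars.join ", ".toList cur ++ ", ".toList ++
                PySem.Chars.slice l (some (k : Int)) (some (l.length : Int)))) =
            (al, PySem.Chars.join ", ".toList
              (cur ++ [PySem.Chars.slice l (some (k : Int)) (some (l.length : Int))])) := by
          by_cases hc : cur = []
          · subst hc
            simp [PySem.Chars.join_nil, PySem.Chars.join_singleton]
          · rw [if_neg (join_ne_nil _ _ hc hcur), join_append_singleton _ _ _ hc]
        simp only [List.foldl_cons, if_pos hl]
        rw [step, ih al _ hcur']
      · -- short line: flush
        rw [pvBlocks_cons_short _ _ _ _ hl]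
        simp only [List.foldl_cons, if_neg hl]
        have := ih (al ++ (if (PySem.Chars.join ", ".toList cur).length > 10
            then [String.ofList (PySem.Chars.join ", ".toList cur)] else [])) [] (by simp)
        rw [PySem.Chars.join_nil] at this
        by_cases h10 : (PySem.Chars.join ", ".toList cur).length > 10
        · rw [if_pos h10]
          rw [if_pos h10] at this
          rw [this, List.filter_cons, if_pos (decide_eq_true h10)]
          simp
        · rw [if_neg h10]
          rw [if_neg h10] at this
          rw [List.append_nil] at this
          rw [this, List.filter_cons, if_neg (by simpa using h10)]

-- ===== VERDICT (by name: the statement is the Claim_ definition above) =====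
theorem spouse_add_spec : Claim_equal_spouse_add := by
  intro f1 _
  show spouse_add f1 = spouse_add_alt f1
  simp only [spouse_add, spouse_add_alt]
  rcases Int.lt_or_le (PySem.Chars.find ((PySem.Chars.splitOn f1.toList ['\n']).headD []) "Address".toList) 0 with h | h
  · rw [spouse_add_loop_neg ", ".toList _ h _ [] []]
    rw [spouseAddBlocks]
    have hfi : (PySem.Chars.splitOn f1.toList ['\n']).findIdx?
        (fun l => decide ((l.length : Int) ≤
          PySem.Chars.find ((PySem.Chars.splitOn f1.toList ['\n']).headD []) "Address".toList)) = none := by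
      rw [List.findIdx?_eq_none_iff]
      intro x _
      simp only [decide_eq_false_iff_not, not_le]
      calc PySem.Chars.find ((PySem.Chars.splitOn f1.toList ['\n']).headD []) "Address".toList
          < 0 := h
        _ ≤ (x.length : Int) := by positivity
    rw [hfi]
    rfl
  · obtain ⟨k, hk⟩ := Int.eq_ofNat_of_zero_le h
    rw [hk]
    have := spouse_add_loop_eq_blocks k (PySem.Chars.splitOn f1.toList ['\n']) [] [] (by simp)
    rw [PySem.Chars.join_nil] at this
    rw [this, pvBlocks_nil_eq]
    rw [List.nil_append]
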